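-- pv_equiv track=rewrite | github.com/jarredbarber/erdos-1094g | check_kummer.py | has_carry
-- ===== SOURCE A (Python) =====
-- def has_carry(n, k, p):
--     # Check if k + (n-k) has a carry in base p
--     # Equivalent to checking if there's some i such that (k // p^i) % p + ((n-k) // p^i) % p >= p
--     # Or simply: digit sum of n is less than digit sum of k + digit sum of n-k
--     temp_n = n
--     temp_k = k
--     temp_m = n - k
--     while temp_n > 0:
--         if (temp_k % p) + (temp_m % p) >= p:
--             return True
--         temp_n //= p
--         temp_k //= p
--         temp_m //= p
--     return False
-- ===== SOURCE B (Python) =====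
-- def has_carry(n, k, p):
--     # Prefix form of the carry condition: a carry occurs in k + (n-k) base p
--     # iff for some i, k % p^(i+1) + (n-k) % p^(i+1) >= p^(i+1).
--     # One growing modulus q = p^(i+1), same number of iterations as the digits of n.
--     m = n - k
--     q = 1
--     while q <= n:
--         q *= p
--         if k % q + m % q >= q:
--             return True
--     return False
-- ===== Notes on version B (the rewrite author's own statement) =====
-- stated objective: alternative
-- what changed: B replaces A's three shrinking quotients with a single growing modulus q = p^(i+1), testing the prefix form of the carry condition k % q + (n-k) % q >= q instead of A's per-digit test on the quotients.
-- outside the precondition, e.g. on has_carry(1, 0, 0): A raises ZeroDivisionError, B raises ZeroDivisionError; on has_carry(2, -59, -6): A returns False, B returns True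
import Mathlib
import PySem

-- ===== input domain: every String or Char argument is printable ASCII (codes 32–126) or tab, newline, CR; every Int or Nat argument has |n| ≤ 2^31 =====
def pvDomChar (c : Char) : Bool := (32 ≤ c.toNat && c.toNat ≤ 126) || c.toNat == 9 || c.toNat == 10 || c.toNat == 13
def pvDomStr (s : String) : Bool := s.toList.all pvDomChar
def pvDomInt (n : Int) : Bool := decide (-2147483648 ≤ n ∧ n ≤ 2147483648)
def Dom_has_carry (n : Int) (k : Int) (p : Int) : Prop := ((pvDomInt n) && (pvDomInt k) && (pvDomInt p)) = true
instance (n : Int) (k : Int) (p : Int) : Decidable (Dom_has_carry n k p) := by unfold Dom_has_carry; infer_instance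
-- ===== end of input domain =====

-- B replaces A's three shrinking quotients with a single growing modulus q = p^(i+1),
-- testing the prefix form of the carry condition k % q + (n-k) % q >= q.

-- ===== PORT A =====
-- 'while temp_n > 0' loop as fuel recursion; fuel n.toNat+1 suffices on Pre_ (temp_n strictly shrinks when p ≥ 2).
def hcLoopA (p : Int) : Nat → Int → Int → Int → Bool
  | 0, _, _, _ => false
  | f + 1, tn, tk, tm =>
    if tn > 0 then
      if PySem.Int.mod tk p + PySem.Int.mod tm p ≥ p then true
      else hcLoopA p f (PySem.Int.floordiv tn p) (PySem.Int.floordiv tk p) (PySem.Int.floordiv tm p)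
    else false

def has_carry (n : Int) (k : Int) (p : Int) : Bool :=
  hcLoopA p (n.toNat + 1) n k (n - k)

-- ===== PORT B =====
-- 'while q <= n' loop: q *= p, then test the prefix carry condition at modulus q.
def hcLoopB (n : Int) (k : Int) (m : Int) (p : Int) : Nat → Int → Bool
  | 0, _ => false
  | f + 1, q =>
    if q ≤ n then
      if PySem.Int.mod k (q * p) + PySem.Int.mod m (q * p) ≥ q * p then true
      else hcLoopB n k m p f (q * p)
    else false

def has_carry_alt (n : Int) (k : Int) (p : Int) : Bool :=
  hcLoopB n k (n - k) p (n.toNat + 1) 1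

-- ===== PRECONDITION & SPEC =====
-- Pre_ excludes n > 0 with p ≤ 1: there A raises ZeroDivisionError (p = 0), loops forever (p = 1),
-- or — for negative p — "base p" is meaningless and each implementation's value is an accident of its loop.
def Pre_has_carry (n : Int) (k : Int) (p : Int) : Prop := n ≤ 0 ∨ 2 ≤ p
instance (n : Int) (k : Int) (p : Int) : Decidable (Pre_has_carry n k p) := by unfold Pre_has_carry; infer_instance
def pvWitness_has_carry : Int × Int × Int := (10, 3, 2)

def Spec_has_carry (n : Int) (k : Int) (p : Int) (out : Bool) : Prop := out = has_carry_alt n k p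
instance (n : Int) (k : Int) (p : Int) (out : Bool) : Decidable (Spec_has_carry n k p out) := by unfold Spec_has_carry; infer_instance

-- ===== CLAIM (what is proved, stated in full; the proofs are below) =====
def Claim_equal_has_carry : Prop := ∀ (n : Int) (k : Int) (p : Int), Dom_has_carry n k p → Pre_has_carry n k p → Spec_has_carry n k p (has_carry n k p)

-- ===== LEMMAS AND PROOFS =====

-- x mod (q*p) splits into the digit (x/q) mod p (scaled by q) and the tail x mod q
theorem hc_emod_mul_decomp (x q p : Int) (hq : 0 < q) (hp : 0 < p) :
    x % (q * p) = q * ((x / q) % p) + x % q := by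
  have h1 := Int.ediv_add_emod x q
  have h2 := Int.ediv_add_emod (x / q) p
  have hr1 : 0 ≤ x % q := Int.emod_nonneg _ hq.ne'
  have hr2 : x % q < q := Int.emod_lt_of_pos _ hq
  have hr3 : 0 ≤ (x / q) % p := Int.emod_nonneg _ hp.ne'
  have hr4 : (x / q) % p < p := Int.emod_lt_of_pos _ hp
  have hx : x = (q * ((x / q) % p) + x % q) + (q * p) * ((x / q) / p) := by
    linear_combination -h1 - q * h2
  have hb : q * ((x / q) % p) + x % q < q * p := by
    nlinarith [mul_le_mul_of_nonneg_left (show (x / q) % p ≤ p - 1 by omega) hq.le]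
  have hb0 : 0 ≤ q * ((x / q) % p) + x % q :=
    add_nonneg (mul_nonneg hq.le hr3) hr1
  calc x % (q * p)
      = ((q * ((x / q) % p) + x % q) + (q * p) * ((x / q) / p)) % (q * p) := by rw [← hx]
    _ = (q * ((x / q) % p) + x % q) % (q * p) := by rw [Int.add_mul_emod_self_left]
    _ = q * ((x / q) % p) + x % q := Int.emod_eq_of_lt hb0 hb

-- dividing a positive number by p ≥ 2 shrinks it
theorem hc_ediv_lt (p tn : Int) (hp : 2 ≤ p) (htn : 0 < tn) :
    0 ≤ tn / p ∧ tn / p < tn := by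
  have h := Int.ediv_add_emod tn p
  have h0 : 0 ≤ tn % p := Int.emod_nonneg tn (by omega)
  have hq0 : 0 ≤ tn / p := Int.ediv_nonneg htn.le (by omega)
  refine ⟨hq0, ?_⟩
  nlinarith [mul_le_mul_of_nonneg_right (show (1 : Int) ≤ p - 1 by omega) hq0]

-- main loop correspondence: A at the quotient state (n/q, k/q, m/q) equals B at modulus q,
-- given the no-carry-so-far invariant k%q + m%q = n%q
theorem hc_loop_eq (n k m p : Int) (hp : 2 ≤ p) (hnm : n = k + m) :
    ∀ (f : Nat) (q : Int), 0 < q → k % q + m % q = n % q → (n / q).toNat < f →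
      hcLoopA p f (n / q) (k / q) (m / q) = hcLoopB n k m p f q := by
  intro f
  induction f with
  | zero => intro q _ _ hf; omega
  | succ f ih =>
    intro q hq hinv hf
    have hp0 : (0 : Int) < p := by omega
    have hq' : 0 < q * p := by positivity
    have hguard : (n / q > 0) ↔ (q ≤ n) := by
      rw [gt_iff_lt, Int.lt_iff_add_one_le, zero_add, Int.le_ediv_iff_mul_le hq, one_mul]
    by_cases hg : q ≤ n
    · have hgA : n / q > 0 := hguard.mpr hg
      have hdk : k % (q * p) = q * ((k / q) % p) + k % q := hc_emod_mul_decomp k q p hq hp0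
      have hdm : m % (q * p) = q * ((m / q) % p) + m % q := hc_emod_mul_decomp m q p hq hp0
      have hrn0 : 0 ≤ n % q := Int.emod_nonneg _ hq.ne'
      have hrn1 : n % q < q := Int.emod_lt_of_pos _ hq
      have hS0 : 0 ≤ (k / q) % p := Int.emod_nonneg _ hp0.ne'
      have hS1 : (k / q) % p < p := Int.emod_lt_of_pos _ hp0
      have hT0 : 0 ≤ (m / q) % p := Int.emod_nonneg _ hp0.ne'
      have hT1 : (m / q) % p < p := Int.emod_lt_of_pos _ hp0
      -- A's per-digit test equals B's prefix test
      have hcarry : ((k / q) % p + (m / q) % p ≥ p) ↔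
          (k % (q * p) + m % (q * p) ≥ q * p) := by
        rw [hdk, hdm]
        constructor
        · intro h
          nlinarith [mul_le_mul_of_nonneg_left h hq.le]
        · intro h
          by_contra hc; push_neg at hc
          nlinarith [mul_le_mul_of_nonneg_left (show (k / q) % p + (m / q) % p ≤ p - 1 by omega) hq.le]
      simp only [hcLoopA, hcLoopB, if_pos hgA, if_pos hg,
        PySem.Int.mod_eq_emod_of_pos hq', PySem.Int.mod_eq_emod_of_pos hp0]
      by_cases hc : (k / q) % p + (m / q) % p ≥ p
      · rw [if_pos hc, if_pos (hcarry.mp hc)]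
      · rw [if_neg hc, if_neg (fun h => hc (hcarry.mpr h))]
        -- no carry: recurse with modulus q*p
        have hfd : ∀ x : Int, PySem.Int.floordiv x p = x / p :=
          fun x => PySem.Int.floordiv_eq_ediv_of_pos hp0
        have hcomp : ∀ x : Int, (x / q) / p = x / (q * p) :=
          fun _ => Int.ediv_ediv_of_nonneg hq.le
        have hge0 : 0 ≤ k % (q * p) + m % (q * p) := by
          have := Int.emod_nonneg k hq'.ne'
          have := Int.emod_nonneg m hq'.ne'
          omega
        have hlt : k % (q * p) + m % (q * p) < q * p := by
          push_neg at hc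
          nlinarith [hdk, hdm, hinv,
            mul_le_mul_of_nonneg_left (show (k / q) % p + (m / q) % p ≤ p - 1 by omega) hq.le]
        have hinv' : k % (q * p) + m % (q * p) = n % (q * p) := by
          have h1 := Int.ediv_add_emod k (q * p)
          have h2 := Int.ediv_add_emod m (q * p)
          have hn' : n = (k % (q * p) + m % (q * p)) + (q * p) * (k / (q * p) + m / (q * p)) := by
            linear_combination hnm - h1 - h2
          rw [hn', Int.add_mul_emod_self_left, Int.emod_eq_of_lt hge0 hlt]
        have hshrink := hc_ediv_lt p (n / q) hp hgA
        have hfuel : (n / (q * p)).toNat < f := by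
          have hlt' : n / (q * p) < n / q := by rw [← hcomp n]; exact hshrink.2
          omega
        rw [hfd, hfd, hfd, hcomp n, hcomp k, hcomp m]
        exact ih (q * p) hq' hinv' hfuel
    · have hgA : ¬ (n / q > 0) := fun h => hg (hguard.mp h)
      simp [hcLoopA, hcLoopB, hgA, hg]

-- ===== VERDICT (by name: the statement is the Claim_ definition above) =====
theorem has_carry_spec : Claim_equal_has_carry := by
  intro n k p _ hpre
  unfold Spec_has_carry has_carry has_carry_alt
  by_cases hn : n > 0
  · have hp : 2 ≤ p := by rcases hpre with h | h; omega; exact h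
    have h := hc_loop_eq n k (n - k) p hp (by ring) (n.toNat + 1) 1 one_pos
      (by simp) (by simp only [Int.ediv_one]; omega)
    simpa only [Int.ediv_one] using h
  · have h1 : ¬ ((1 : Int) ≤ n) := by omega
    simp [hcLoopA, hcLoopB, hn, h1]
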